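-- pv_equiv track=rewrite | github.com/thefish12357/hamradio-award-system | src/adif_parser/callsign_parser.py | _compress_prefixes
-- ===== SOURCE A (Python) =====
-- from typing import Dict, Set, List, Tuple
--
-- def _compress_prefixes(prefixes: Set[str]) -> List[str]:
--     """生成精简表示：仅对两字母全字母前缀尝试合并连续序列（如 BA-BL）。
--     其他前缀保持原样。
--     """
--     two_letter = {}
--     others = []
--     for p in prefixes:
--         if len(p) == 2 and p.isalpha():
--             two_letter.setdefault(p[0], []).append(p)
--         else:
--             others.append(p)
--
--     parts: List[str] = []
--     for first, lst in two_letter.items():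
--         seq = sorted(lst)
--         # compress consecutive second letters
--         run_start = run_end = None
--         for s in seq:
--             second = s[1]
--             if run_start is None:
--                 run_start = run_end = second
--             elif ord(second) == ord(run_end) + 1:
--                 run_end = second
--             else:
--                 if run_start == run_end:
--                     parts.append(first + run_start)
--                 else:
--                     parts.append(f"{first}{run_start}-{first}{run_end}")
--                 run_start = run_end = second
--         if run_start is not None:
--             if run_start == run_end:
--                 parts.append(first + run_start)
--             else:
--                 parts.append(f"{first}{run_start}-{first}{run_end}")
--
--     # add others (sorted)
--     parts.extend(sorted(others))
--     return parts
-- ===== SOURCE B (Python) =====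
-- def _compress_prefixes(prefixes):
--     """Same result, different shape: filter/dedup comprehensions instead of a
--     dict-of-lists, and a back-to-front run builder instead of a run_start/run_end
--     state machine with a trailing flush."""
--
--     def mergeable(p):
--         return len(p) == 2 and p.isalpha()
--
--     def runs(letters):
--         # split sorted letters into maximal consecutive-alphabet chunks,
--         # building the chunk list from the right
--         out = []
--         for c in reversed(letters):
--             if out and ord(out[0][0]) == ord(c) + 1:
--                 out[0] = c + out[0]
--             else:
--                 out.insert(0, c)
--         return out
--
--     twos = [p for p in prefixes if mergeable(p)]
--     firsts = list(dict.fromkeys(p[0] for p in twos))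
--     parts = [
--         first + r if len(r) == 1 else f"{first}{r[0]}-{first}{r[-1]}"
--         for first in firsts
--         for r in runs(''.join(p[1] for p in sorted(q for q in twos if q[0] == first)))
--     ]
--     parts.extend(sorted(p for p in prefixes if not mergeable(p)))
--     return parts
-- ===== Notes on version B (the rewrite author's own statement) =====
-- stated objective: alternative
-- what changed: Replaces the dict-of-lists grouping and the run_start/run_end state machine (with its duplicated emit/flush code) by filter+dedup comprehensions per first letter and a back-to-front run builder that merges each letter into the following run, rendering every run uniformly in one place.
import Mathlib
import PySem

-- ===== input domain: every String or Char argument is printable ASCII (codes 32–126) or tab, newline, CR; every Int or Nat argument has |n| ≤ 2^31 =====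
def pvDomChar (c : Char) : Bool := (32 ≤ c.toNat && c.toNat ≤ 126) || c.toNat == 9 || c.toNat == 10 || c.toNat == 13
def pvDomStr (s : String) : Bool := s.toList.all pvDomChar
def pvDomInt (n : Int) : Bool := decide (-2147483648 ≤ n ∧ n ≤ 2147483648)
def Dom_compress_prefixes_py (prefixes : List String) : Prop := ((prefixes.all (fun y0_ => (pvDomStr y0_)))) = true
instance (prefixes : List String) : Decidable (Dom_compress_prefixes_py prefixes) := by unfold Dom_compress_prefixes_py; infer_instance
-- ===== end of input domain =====

-- B replaces A's dict-of-lists grouping and run_start/run_end state machine by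
-- filter/dedup passes and a back-to-front run builder (alternative decomposition, same cost).

-- ===== PORT A =====
-- shared accessors: p[0] / p[1] on a string guaranteed to have length 2 (guarded in both programs)
def cpFst (p : String) : Char := (PySem.Str.pyGet? p 0).getD ' '
def cpSnd (p : String) : Char := (PySem.Str.pyGet? p 1).getD ' '

-- body of A's inner `for s in seq` loop, on the extracted second letter
def cpA_stepC (first : Char) (st : List String × Option Char × Option Char) (second : Char) :
    List String × Option Char × Option Char :=
  match st with
  | (parts, none, _) => (parts, some second, some second)
  | (parts, some rs, some re) =>
    if second.toNat == re.toNat + 1 then (parts, some rs, some second)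
    else if rs == re then (parts ++ [String.ofList [first, rs]], some second, some second)
    else (parts ++ [String.ofList [first, rs, '-', first, re]], some second, some second)
  | (parts, some _, none) => (parts, some second, some second)  -- state unreachable from (none, none)

def cpA_step (first : Char) (st : List String × Option Char × Option Char) (s : String) :
    List String × Option Char × Option Char :=
  cpA_stepC first st (cpSnd s)   -- second = s[1]

-- A's trailing `if run_start is not None` flush
def cpA_flush (first : Char) (st : List String × Option Char × Option Char) : List String :=
  match st with
  | (parts, some rs, some re) =>
    if rs == re then parts ++ [String.ofList [first, rs]]
    else parts ++ [String.ofList [first, rs, '-', first, re]]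
  | (parts, _, _) => parts

def compress_prefixes_py (prefixes : List String) : List String :=
  -- first loop: two_letter (setdefault+append = modify with default []) and others
  let st := prefixes.foldl (fun s p =>
      if PySem.Str.len p == 2 && PySem.Str.strIsalpha p then
        (s.1.modify (cpFst p) [] (fun l => l ++ [p]), s.2)
      else (s.1, s.2 ++ [p]))
    ((PySem.Dict.empty : PySem.Dict Char (List String)), ([] : List String))
  -- second loop over two_letter.items()
  let parts := st.1.items.foldl (fun parts fl =>
      cpA_flush fl.1 ((PySem.List.sorted fl.2 (fun x => x) false).foldl (cpA_step fl.1) (parts, none, none)))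
    []
  parts ++ PySem.List.sorted st.2 (fun x => x) false

-- ===== PORT B =====
def cpB_mergeable (p : String) : Bool := PySem.Str.len p == 2 && PySem.Str.strIsalpha p

-- `runs`: fold from the right, merging each letter into the following run when consecutive
def cpB_runs (letters : List Char) : List (List Char) :=
  letters.foldr (fun c out =>
    match out with
    | [] => [[c]]
    | r :: rs => if (r.headD ' ').toNat == c.toNat + 1 then (c :: r) :: rs else [c] :: r :: rs) []

-- `first + r if len(r) == 1 else f"{first}{r[0]}-{first}{r[-1]}"`
def cpB_render (first : Char) (r : List Char) : String :=
  if PySem.List.len r == 1 then String.ofList (first :: r)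
  else String.ofList [first, (PySem.List.pyGet? r 0).getD ' ', '-', first, (PySem.List.pyGet? r (-1)).getD ' ']

def compress_prefixes_py_alt (prefixes : List String) : List String :=
  let twos := prefixes.filter cpB_mergeable
  let firsts := PySem.List.dedup (twos.map cpFst)
  let parts := firsts.flatMap (fun first =>
    (cpB_runs ((PySem.List.sorted (twos.filter (fun q => cpFst q == first)) (fun x => x) false).map cpSnd)).map
      (cpB_render first))
  parts ++ PySem.List.sorted (prefixes.filter (fun p => !cpB_mergeable p)) (fun x => x) false

-- ===== PRECONDITION & SPEC =====
def Spec_compress_prefixes_py (prefixes : List String) (out : List String) : Prop := out = compress_prefixes_py_alt prefixes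
instance (prefixes : List String) (out : List String) : Decidable (Spec_compress_prefixes_py prefixes out) := by unfold Spec_compress_prefixes_py; infer_instance

-- ===== CLAIM (what is proved, stated in full; the proofs are below) =====
def Claim_equal_compress_prefixes_py : Prop := ∀ (prefixes : List String), Dom_compress_prefixes_py prefixes → Spec_compress_prefixes_py prefixes (compress_prefixes_py prefixes)

-- ===== LEMMAS AND PROOFS =====

-- endpoint pairs emitted by A's inner loop, pending run (a, b)
def pairsA (a b : Char) : List Char → List (Char × Char)
  | [] => [(a, b)]
  | c :: cs => if c.toNat == b.toNat + 1 then pairsA a c cs else (a, b) :: pairsA c c cs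

-- A's rendering of an endpoint pair
def renderP (first : Char) (q : Char × Char) : String :=
  if q.1 == q.2 then String.ofList [first, q.1] else String.ofList [first, q.1, '-', first, q.2]

-- run endpoints
def ep (r : List Char) : Char × Char := ((r.head?).getD ' ', (r.getLast?).getD ' ')

theorem cpA_loop_eq_pairsA (f : Char) : ∀ (cs : List Char) (parts : List String) (a b : Char),
    cpA_flush f (cs.foldl (cpA_stepC f) (parts, some a, some b)) = parts ++ (pairsA a b cs).map (renderP f) := by
  intro cs
  induction cs with
  | nil =>
    intro parts a b
    simp only [List.foldl_nil, cpA_flush, pairsA, List.map_cons, List.map_nil, renderP]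
    split <;> simp_all
  | cons c cs ih =>
    intro parts a b
    simp only [List.foldl_cons, cpA_stepC, pairsA]
    by_cases h : c.toNat = b.toNat + 1
    · simp [h, ih]
    · by_cases hab : a = b
      · simp [h, hab, ih, renderP]
      · simp [h, hab, ih, renderP]

theorem pairsA_fst : ∀ (cs : List Char) (b : Char), ∃ y rest, ∀ a, pairsA a b cs = (a, y) :: rest := by
  intro cs
  induction cs with
  | nil => intro b; exact ⟨b, [], fun a => rfl⟩
  | cons c cs ih =>
    intro b
    by_cases h : c.toNat = b.toNat + 1
    · obtain ⟨y, rest, hy⟩ := ih c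
      exact ⟨y, rest, fun a => by simp [pairsA, h, hy a]⟩
    · exact ⟨b, pairsA c c cs, fun a => by simp [pairsA, h]⟩

theorem runs_cons_head (c : Char) (cs : List Char) : ∃ t rs, cpB_runs (c :: cs) = (c :: t) :: rs := by
  have he : cpB_runs (c :: cs) = (match cpB_runs cs with
      | [] => [[c]]
      | r :: rs => if (r.headD ' ').toNat == c.toNat + 1 then (c :: r) :: rs else [c] :: r :: rs) := rfl
  rcases hr : cpB_runs cs with _ | ⟨r, rs⟩
  · exact ⟨[], [], by rw [he, hr]⟩
  · rw [he, hr]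
    by_cases h : (r.headD ' ').toNat = c.toNat + 1
    · refine ⟨r, rs, ?_⟩
      have hb : (((r.headD ' ').toNat == c.toNat + 1) = true) := by simpa using h
      dsimp only
      simp only [hb, if_true]
    · refine ⟨[], r :: rs, ?_⟩
      have hb : (((r.headD ' ').toNat == c.toNat + 1) = false) := by simpa using h
      dsimp only
      simp only [hb, Bool.false_eq_true, if_false]

theorem runs_map_ep : ∀ (cs : List Char) (c : Char), (cpB_runs (c :: cs)).map ep = pairsA c c cs := by
  intro cs
  induction cs with
  | nil => intro c; simp [cpB_runs, ep, pairsA]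
  | cons d cs ih =>
    intro c
    obtain ⟨t, rs, ht⟩ := runs_cons_head d cs
    have he : cpB_runs (c :: d :: cs) = (match cpB_runs (d :: cs) with
        | [] => [[c]]
        | r :: rs => if (r.headD ' ').toNat == c.toNat + 1 then (c :: r) :: rs else [c] :: r :: rs) := rfl
    have hih := ih d
    rw [ht] at hih
    rw [he, ht]
    dsimp only
    by_cases h : d.toNat = c.toNat + 1
    · have hb : (((d :: t).headD ' ').toNat == c.toNat + 1) = true := by simpa using h
      simp only [hb, if_true, List.map_cons]
      obtain ⟨y, rest, hy⟩ := pairsA_fst cs d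
      have h3 := hih.trans (hy d)
      simp only [List.map_cons, List.cons_eq_cons] at h3
      have hyy : ((d :: t).getLast?).getD ' ' = y := by
        have h2 := h3.1
        simp only [ep, Prod.mk.injEq, List.head?_cons, Option.getD_some] at h2
        exact h2.2
      have hp : pairsA c c (d :: cs) = pairsA c d cs := by simp [pairsA, h]
      rw [hp, hy c]
      refine List.cons_eq_cons.mpr ⟨?_, h3.2⟩
      simp only [ep, List.head?_cons, Option.getD_some, List.getLast?_cons_cons]
      rw [hyy]
    · have hb : (((d :: t).headD ' ').toNat == c.toNat + 1) = false := by simpa using h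
      have hepc : ep [c] = (c, c) := by simp [ep]
      simp only [hb, Bool.false_eq_true, if_false]
      rw [List.map_cons, hih, hepc]
      simp [pairsA, h]

theorem runs_chain : ∀ (cs : List Char), ∀ r ∈ cpB_runs cs, r ≠ [] ∧ List.IsChain (fun x y => y.toNat = x.toNat + 1) r := by
  intro cs
  induction cs with
  | nil =>
    intro r hr
    rw [show cpB_runs [] = [] from rfl] at hr
    cases hr
  | cons c cs ih =>
    intro r hr
    have he : cpB_runs (c :: cs) = (match cpB_runs cs with
        | [] => [[c]]
        | r :: rs => if (r.headD ' ').toNat == c.toNat + 1 then (c :: r) :: rs else [c] :: r :: rs) := rfl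
    rw [he] at hr
    rcases hcs : cpB_runs cs with _ | ⟨r0, rs0⟩
    · rw [hcs] at hr
      dsimp only at hr
      rw [List.mem_singleton] at hr
      subst hr
      exact ⟨by simp, List.IsChain.singleton c⟩
    · rw [hcs] at hr
      have h0 := ih r0 (by rw [hcs]; exact List.mem_cons_self ..)
      rcases hr0 : r0 with _ | ⟨x, t⟩
      · subst hr0; exact absurd rfl h0.1
      · subst hr0
        dsimp only at hr
        simp only [List.headD_cons] at hr
        by_cases h : x.toNat = c.toNat + 1
        · simp only [show (x.toNat == c.toNat + 1) = true from by simpa using h, if_true] at hr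
          rcases List.mem_cons.mp hr with h1 | h1
          · subst h1
            exact ⟨by simp, List.IsChain.cons_cons h h0.2⟩
          · exact ih r (by rw [hcs]; exact List.mem_cons_of_mem _ h1)
        · simp only [show (x.toNat == c.toNat + 1) = false from by simpa using h,
            Bool.false_eq_true, if_false] at hr
          rcases List.mem_cons.mp hr with h1 | h1
          · subst h1; exact ⟨by simp, List.IsChain.singleton c⟩
          · exact ih r (by rw [hcs]; exact h1)

theorem chain_le_last : ∀ (t : List Char) (y : Char),
    List.IsChain (fun x y => y.toNat = x.toNat + 1) (y :: t) →
    y.toNat ≤ (((y :: t).getLast?).getD ' ').toNat := by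
  intro t
  induction t with
  | nil => intro y _; simp
  | cons z t ih =>
    intro y hc
    rw [List.getLast?_cons_cons]
    have h1 := List.IsChain.rel hc
    simp only at h1
    have h2 := ih z (List.IsChain.of_cons hc)
    omega

theorem render_eq (f : Char) (r : List Char) (h : r ≠ []) (hc : List.IsChain (fun x y => y.toNat = x.toNat + 1) r) :
    cpB_render f r = renderP f (ep r) := by
  rcases r with _ | ⟨x, t⟩
  · exact absurd rfl h
  rcases t with _ | ⟨y, t⟩
  · simp [cpB_render, renderP, ep, PySem.List.len_eq]
  · have hlen : (PySem.List.len (x :: y :: t) == 1) = false := by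
      simp only [PySem.List.len_eq, beq_eq_false_iff_ne, List.length_cons]
      push_cast
      omega
    have hxy' := List.IsChain.rel hc
    simp only at hxy'
    have hxy : y.toNat = x.toNat + 1 := hxy'
    have hle := chain_le_last t y (List.IsChain.of_cons hc)
    have hne : (x == (((x :: y :: t).getLast?).getD ' ')) = false := by
      rw [List.getLast?_cons_cons]
      refine beq_eq_false_iff_ne.mpr ?_
      intro heq
      have := congrArg Char.toNat heq
      omega
    simp only [cpB_render, renderP, ep, hlen, Bool.false_eq_true, if_false,
      List.head?_cons, Option.getD_some, hne,
      PySem.List.pyGet?_zero_cons, PySem.List.pyGet?_neg_one]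
theorem inner_eq (f : Char) (seq : List String) (parts : List String) :
    cpA_flush f (seq.foldl (cpA_step f) (parts, none, none)) =
      parts ++ (cpB_runs (seq.map cpSnd)).map (cpB_render f) := by
  have hfold : seq.foldl (cpA_step f) ((parts, none, none) : List String × Option Char × Option Char) =
      (seq.map cpSnd).foldl (cpA_stepC f) (parts, none, none) := by
    rw [List.foldl_map]
    rfl
  rw [hfold]
  rcases hm : seq.map cpSnd with _ | ⟨c, cs⟩
  · simp [cpA_flush, cpB_runs]
  · rw [List.foldl_cons]
    have hstep : cpA_stepC f (parts, none, none) c = (parts, some c, some c) := rfl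
    rw [hstep, cpA_loop_eq_pairsA]
    congr 1
    rw [← runs_map_ep cs c, List.map_map]
    exact List.map_congr_left fun r hr =>
      (render_eq f r (runs_chain _ r hr).1 (runs_chain _ r hr).2).symm
theorem phase1_eq (l : List String) (d : PySem.Dict Char (List String)) (o : List String) :
    l.foldl (fun s p =>
        if PySem.Str.len p == 2 && PySem.Str.strIsalpha p then
          (s.1.modify (cpFst p) [] (fun l => l ++ [p]), s.2)
        else (s.1, s.2 ++ [p])) (d, o) =
      ((l.filter (fun p => PySem.Str.len p == 2 && PySem.Str.strIsalpha p)).foldl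
          (fun d p => d.modify (cpFst p) [] (fun l => l ++ [p])) d,
       o ++ l.filter (fun p => !(PySem.Str.len p == 2 && PySem.Str.strIsalpha p))) := by
  induction l generalizing d o with
  | nil => simp
  | cons p l ih =>
    cases h : (PySem.Str.len p == 2 && PySem.Str.strIsalpha p) with
    | true =>
      simp only [List.foldl_cons, List.filter_cons, h, Bool.not_true, if_true,
        Bool.false_eq_true, if_false]
      exact ih _ _
    | false =>
      simp only [List.foldl_cons, List.filter_cons, h, Bool.not_false, if_true,
        Bool.false_eq_true, if_false]
      rw [ih]
      simp
theorem foldl_modify_map (tm : List String) (d : PySem.Dict Char (List String)) :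
    tm.foldl (fun d p => d.modify (cpFst p) [] (fun l => l ++ [p])) d =
      (tm.map (fun p => (cpFst p, p))).foldl (fun d q => d.modify q.1 [] (fun l => l ++ [q.2])) d := by
  induction tm generalizing d with
  | nil => rfl
  | cons p tm ih => simp only [List.foldl_cons, List.map_cons]; exact ih _

theorem getD_dictOf (tm : List String) (c : Char) :
    (tm.foldl (fun d p => d.modify (cpFst p) [] (fun l => l ++ [p]))
        (PySem.Dict.empty : PySem.Dict Char (List String))).getD c [] =
      tm.filter (fun p => cpFst p == c) := by
  rw [foldl_modify_map, PySem.Dict.getD_foldl_modify_append, PySem.Dict.getD_empty]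
  rw [List.filter_map, List.map_map]
  simp only [Function.comp_def]
  simp
theorem items_dictOf (tm : List String) :
    (tm.foldl (fun d p => d.modify (cpFst p) [] (fun l => l ++ [p]))
        (PySem.Dict.empty : PySem.Dict Char (List String))).items =
      (PySem.List.dedup (tm.map cpFst)).map (fun k => (k, tm.filter (fun p => cpFst p == k))) := by
  have hnd : (tm.foldl (fun d p => d.modify (cpFst p) [] (fun l => l ++ [p]))
      (PySem.Dict.empty : PySem.Dict Char (List String))).keys.Nodup :=
    PySem.Dict.nodup_keys_foldl_modify_key tm cpFst [] (fun _ p => (· ++ [p])) _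
      PySem.Dict.nodup_keys_empty
  rw [PySem.Dict.items_eq_map_keys _ hnd []]
  have hkeys : (tm.foldl (fun d p => d.modify (cpFst p) [] (fun l => l ++ [p]))
      (PySem.Dict.empty : PySem.Dict Char (List String))).keys =
      PySem.List.dedup (tm.map cpFst) := by
    rw [PySem.Dict.keys_foldl_modify_key tm cpFst [] (fun _ p => (· ++ [p]))]
    rw [PySem.List.dedup_eq_ofList, PySem.Set.ofList_eq_foldl]
    rfl
  rw [hkeys]
  exact List.map_congr_left fun k _ => by rw [getD_dictOf]
-- ===== VERDICT (by name: the statement is the Claim_ definition above) =====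
theorem compress_prefixes_py_spec : Claim_equal_compress_prefixes_py := by
  unfold Claim_equal_compress_prefixes_py
  intro prefixes _
  unfold Spec_compress_prefixes_py
  simp only [compress_prefixes_py, compress_prefixes_py_alt]
  rw [phase1_eq, items_dictOf]
  have hbody : (fun (parts : List String) (fl : Char × List String) =>
      cpA_flush fl.1 ((PySem.List.sorted fl.2 (fun x => x) false).foldl (cpA_step fl.1) (parts, none, none))) =
      (fun parts fl => parts ++ (cpB_runs ((PySem.List.sorted fl.2 (fun x => x) false).map cpSnd)).map (cpB_render fl.1)) := by
    funext parts fl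
    exact inner_eq fl.1 _ parts
  rw [hbody, PySem.List.foldl_append_eq_flatMap, List.flatMap_map]
  have htwos : prefixes.filter cpB_mergeable =
      prefixes.filter (fun p => PySem.Str.len p == 2 && PySem.Str.strIsalpha p) := rfl
  have hoth : (fun p => !cpB_mergeable p) =
      (fun p => !(PySem.Str.len p == 2 && PySem.Str.strIsalpha p)) := rfl
  rw [htwos, hoth]
  simp only [List.nil_append]
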